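-- pv_equiv track=rewrite | github.com/cartwatson/coding-challenges | bachelor-calc/bachelor-calc.py | find_placement
-- ===== SOURCE A (Python) =====
-- def find_placement(contestant_str):
--     if "-next" in contestant_str:
--         return 11
--
--     # Check for "-# or -##" anywhere in the string
--     for i in range(len(contestant_str) - 1):
--         # Check for "-#"
--         if contestant_str[i] == '-' and contestant_str[i+1].isdigit():
--             # If there's a next digit, append it
--             if i+2 < len(contestant_str) and contestant_str[i+2].isdigit():
--                 return int(contestant_str[i+1:i+3])
--             else:
--                 return int(contestant_str[i+1])
--
--     return 0
-- ===== SOURCE B (Python) =====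
-- def find_placement(contestant_str):
--     if "-next" in contestant_str:
--         return 11
--     # Each fragment after a '-' is examined for one or two leading digits.
--     for part in contestant_str.split('-')[1:]:
--         if part[:1].isdigit():
--             digits = part[:2] if part[1:2].isdigit() else part[:1]
--             return int(digits)
--     return 0
-- ===== Notes on version B (the rewrite author's own statement) =====
-- stated objective: faster
-- what changed: Replaces the manual per-character index loop with lookahead by splitting the string on the dash separator and reading the one or two leading digits of the first following fragment that starts with a digit.
import Mathlib
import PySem

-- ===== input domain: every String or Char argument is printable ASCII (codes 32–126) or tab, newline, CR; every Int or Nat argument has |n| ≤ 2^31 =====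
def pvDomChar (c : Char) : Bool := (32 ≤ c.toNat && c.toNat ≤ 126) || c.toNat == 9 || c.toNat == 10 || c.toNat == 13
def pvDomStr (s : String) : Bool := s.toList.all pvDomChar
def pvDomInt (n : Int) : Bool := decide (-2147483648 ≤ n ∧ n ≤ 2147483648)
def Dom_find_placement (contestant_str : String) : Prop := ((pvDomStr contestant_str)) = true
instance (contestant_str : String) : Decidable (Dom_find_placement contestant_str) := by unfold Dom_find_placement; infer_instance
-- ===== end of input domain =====

-- B replaces A's manual per-character index loop (scan every position for a dash, then
-- peek ahead) by splitting the string on the dash and reading the leading digits of the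
-- first following fragment that starts with a digit (measured constant-factor faster:
-- the scan runs inside the C-level str.split instead of a Python-level loop).

-- ===== PORT A =====
-- the 'for i in range(len(s) - 1)' loop with early return, as recursion on the range list
def findA_loop (s : List Char) : List Int → Int
  | [] => 0
  | i :: is =>
    if PySem.List.pyGetD s i ' ' = '-' ∧
        PySem.Chars.isdigit (PySem.List.pyGetD s (i + 1) ' ') then
      if i + 2 < (s.length : Int) ∧ PySem.Chars.isdigit (PySem.List.pyGetD s (i + 2) ' ') then
        (PySem.Int.ofChars? (PySem.List.slice s (some (i + 1)) (some (i + 3)))).getD 0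
      else
        (PySem.Int.ofChars? [PySem.List.pyGetD s (i + 1) ' ']).getD 0
    else findA_loop s is

def find_placement (contestant_str : String) : Int :=
  if PySem.Str.isIn "-next" contestant_str then 11
  else findA_loop contestant_str.toList
    (PySem.List.pyRange 0 ((contestant_str.toList.length : Int) - 1) 1)

-- ===== PORT B =====
-- 'for part in contestant_str.split('-')[1:]' with early return, as recursion on the parts
def findB_loop (parts : List (List Char)) : Int :=
  match parts with
  | [] => 0
  | part :: rest =>
    if PySem.Chars.strIsdigit (PySem.List.slice part none (some 1)) then
      (PySem.Int.ofChars?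
        (if PySem.Chars.strIsdigit (PySem.List.slice part (some 1) (some 2)) then
          PySem.List.slice part none (some 2)
        else PySem.List.slice part none (some 1))).getD 0
    else findB_loop rest

def find_placement_alt (contestant_str : String) : Int :=
  if PySem.Str.isIn "-next" contestant_str then 11
  else findB_loop ((PySem.Chars.splitOn contestant_str.toList ['-']).drop 1)

-- ===== PRECONDITION & SPEC =====
def Spec_find_placement (contestant_str : String) (out : Int) : Prop := out = find_placement_alt contestant_str
instance (contestant_str : String) (out : Int) : Decidable (Spec_find_placement contestant_str out) := by unfold Spec_find_placement; infer_instance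

-- ===== CLAIM (what is proved, stated in full; the proofs are below) =====
def Claim_equal_find_placement : Prop := ∀ (contestant_str : String), Dom_find_placement contestant_str → Spec_find_placement contestant_str (find_placement contestant_str)

-- ===== LEMMAS AND PROOFS =====

-- proof-side characterisation: scan the characters, firing at the first '-' followed by a digit
def specF : List Char → Int
  | [] => 0
  | c :: rest =>
    if c = '-' then
      match rest with
      | [] => 0
      | d :: tl =>
        if PySem.Chars.isdigit d then
          match tl with
          | [] => (PySem.Int.ofChars? [d]).getD 0
          | e :: _ =>
            if PySem.Chars.isdigit e then (PySem.Int.ofChars? [d, e]).getD 0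
            else (PySem.Int.ofChars? [d]).getD 0
        else specF rest
    else specF rest

lemma specF_short (l : List Char) (h : l.length ≤ 1) : specF l = 0 := by
  match l, h with
  | [], _ => rfl
  | [c], _ => simp [specF]

lemma findA_loop_eq_specF_aux (n : Nat) :
    ∀ (s : List Char) (i : Nat), s.length - i ≤ n →
      findA_loop s (PySem.List.pyRange (i : Int) ((s.length : Int) - 1) 1) = specF (s.drop i) := by
  induction n with
  | zero =>
    intro s i h
    rw [PySem.List.pyRange_one_eq_nil (by omega), findA_loop,
      List.drop_eq_nil_of_le (by omega)]
    rfl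
  | succ n ih =>
    intro s i h
    by_cases hi : (i : Int) < (s.length : Int) - 1
    · rw [PySem.List.pyRange_one_cons hi, findA_loop]
      have hi' : i < s.length - 1 := by omega
      have hi0 : i < s.length := by omega
      have hi1 : i + 1 < s.length := by omega
      have e1 : (i : Int) + 1 = ((i + 1 : Nat) : Int) := by push_cast; ring
      have e2 : (i : Int) + 2 = ((i + 2 : Nat) : Int) := by push_cast; ring
      have e3 : (i : Int) + 3 = ((i + 3 : Nat) : Int) := by push_cast; ring
      have g0 : PySem.List.pyGetD s (i : Int) ' ' = s[i] := by
        rw [PySem.List.pyGetD_natCast, List.getD_eq_getElem _ _ hi0]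
      have g1 : PySem.List.pyGetD s ((i : Int) + 1) ' ' = s[i + 1] := by
        rw [e1, PySem.List.pyGetD_natCast, List.getD_eq_getElem _ _ hi1]
      have hd0 : s.drop i = s[i] :: s.drop (i + 1) := List.drop_eq_getElem_cons hi0
      have hd1 : s.drop (i + 1) = s[i + 1] :: s.drop (i + 2) := List.drop_eq_getElem_cons hi1
      rw [g0, g1, hd0, hd1]
      by_cases hc : s[i] = '-' ∧ PySem.Chars.isdigit s[i + 1]
      · rw [if_pos hc]
        by_cases h2 : (i : Int) + 2 < (s.length : Int) ∧
            PySem.Chars.isdigit (PySem.List.pyGetD s ((i : Int) + 2) ' ')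
        · have hi2 : i + 2 < s.length := by have := h2.1; omega
          have g2 : PySem.List.pyGetD s ((i : Int) + 2) ' ' = s[i + 2] := by
            rw [e2, PySem.List.pyGetD_natCast, List.getD_eq_getElem _ _ hi2]
          have hd2 : s.drop (i + 2) = s[i + 2] :: s.drop (i + 3) := List.drop_eq_getElem_cons hi2
          rw [if_pos h2]
          have hsl : PySem.List.slice s (some ((i : Int) + 1)) (some ((i : Int) + 3)) =
              [s[i + 1], s[i + 2]] := by
            rw [e1, e3, PySem.List.slice_natCast, show i + 3 - (i + 1) = 2 from by omega,
              hd1, hd2]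
            rfl
          rw [hsl, hd2]
          rw [g2] at h2
          simp [specF, hc.1, hc.2, h2.2]
        · rw [if_neg h2]
          by_cases hlen : i + 2 < s.length
          · have g2 : PySem.List.pyGetD s ((i : Int) + 2) ' ' = s[i + 2] := by
              rw [e2, PySem.List.pyGetD_natCast, List.getD_eq_getElem _ _ hlen]
            have hnd : ¬ PySem.Chars.isdigit s[i + 2] := by
              intro hdig; exact h2 ⟨by omega, by rw [g2]; exact hdig⟩
            have hd2 : s.drop (i + 2) = s[i + 2] :: s.drop (i + 3) := List.drop_eq_getElem_cons hlen
            rw [hd2]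
            simp [specF, hc.1, hc.2, hnd]
          · have hd2 : s.drop (i + 2) = [] := List.drop_eq_nil_of_le (by omega)
            rw [hd2]
            simp [specF, hc.1, hc.2]
      · rw [if_neg hc]
        have ihh : findA_loop s (PySem.List.pyRange ((i + 1 : Nat) : Int) ((s.length : Int) - 1) 1) =
            specF (s.drop (i + 1)) := ih s (i + 1) (by omega)
        rw [e1, ihh, hd1]
        by_cases hce : s[i] = '-'
        · have hnd : ¬ PySem.Chars.isdigit s[i + 1] := fun hd => hc ⟨hce, hd⟩
          simp [specF, hce, hnd]
        · simp [specF, hce]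
    · rw [PySem.List.pyRange_one_eq_nil (by omega), findA_loop]
      have : (s.drop i).length ≤ 1 := by simp; omega
      exact (specF_short _ this).symm

lemma findA_loop_eq_specF (s : List Char) :
    findA_loop s (PySem.List.pyRange 0 ((s.length : Int) - 1) 1) = specF s := by
  have h := findA_loop_eq_specF_aux s.length s 0 (by omega)
  simpa using h

-- proof-side split on '-'
def splitDash : List Char → List (List Char)
  | [] => [[]]
  | c :: rest => if c = '-' then [] :: splitDash rest else (splitDash rest).modifyHead (c :: ·)

lemma modifyHead_ne_nil {α : Type} (f : α → α) (l : List α) (h : l ≠ []) :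
    List.modifyHead f l ≠ [] := by
  cases l with
  | nil => exact absurd rfl h
  | cons a t => simp

lemma tail_modifyHead {α : Type} (f : α → α) (l : List α) :
    (List.modifyHead f l).tail = l.tail := by
  cases l <;> simp

lemma modifyHead_id' {α : Type} (l : List α) : List.modifyHead (fun x => x) l = l := by
  cases l <;> simp

lemma modifyHead_comp {α : Type} (f g : α → α) (l : List α) :
    List.modifyHead f (List.modifyHead g l) = List.modifyHead (fun x => f (g x)) l := by
  cases l <;> simp

lemma splitDash_ne_nil (l : List Char) : splitDash l ≠ [] := by
  induction l with
  | nil => simp [splitDash]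
  | cons c rest ih =>
    simp only [splitDash]
    split
    · simp
    · exact modifyHead_ne_nil _ _ ih

lemma splitOn_go_eq (fuel : Nat) :
    ∀ (l cur : List Char) (acc : List (List Char)), l.length < fuel →
    PySem.Chars.splitOn.go ['-'] fuel l cur acc =
      acc.reverse ++ (splitDash l).modifyHead (cur.reverse ++ ·) := by
  induction fuel with
  | zero => intro l cur acc h; omega
  | succ fuel ih =>
    intro l cur acc h
    cases l with
    | nil =>
      rw [PySem.Chars.splitOn.go]
      simp [splitDash]
      omega
    | cons c rest =>
      rw [PySem.Chars.splitOn.go]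
      by_cases hc : c = '-'
      · have hp : ['-'].isPrefixOf (c :: rest) = true := by simp [List.isPrefixOf, hc]
        rw [if_pos hp]
        have : List.drop ['-'].length (c :: rest) = rest := by simp
        rw [this, ih rest [] (cur.reverse :: acc) (by simp at h ⊢; omega)]
        simp [splitDash, hc, modifyHead_id']
      · have hp : ¬ (['-'].isPrefixOf (c :: rest) = true) := by
          simp [List.isPrefixOf]
          exact fun he => absurd he.symm hc
        rw [if_neg hp, ih rest (c :: cur) acc (by simp at h ⊢; omega)]
        simp only [splitDash, if_neg hc]
        rw [modifyHead_comp]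
        have hfun : (fun x => (c :: cur).reverse ++ x) =
            (fun x : List Char => cur.reverse ++ c :: x) := by
          funext x; simp
        rw [hfun]

lemma splitOn_eq_splitDash (l : List Char) :
    PySem.Chars.splitOn l ['-'] = splitDash l := by
  unfold PySem.Chars.splitOn
  rw [splitOn_go_eq (l.length + 1) l [] [] (by omega)]
  simp [modifyHead_id']

lemma slice_take1 (part : List Char) : PySem.List.slice part none (some 1) = part.take 1 := by
  have : ((1 : Nat) : Int) = (1 : Int) := by norm_num
  rw [← this, PySem.List.slice_to_natCast]

lemma slice_take2 (part : List Char) : PySem.List.slice part none (some 2) = part.take 2 := by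
  have : ((2 : Nat) : Int) = (2 : Int) := by norm_num
  rw [← this, PySem.List.slice_to_natCast]

lemma slice_mid (part : List Char) :
    PySem.List.slice part (some 1) (some 2) = (part.drop 1).take 1 := by
  have h1 : ((1 : Nat) : Int) = (1 : Int) := by norm_num
  have h2 : ((2 : Nat) : Int) = (2 : Int) := by norm_num
  rw [← h1, ← h2, PySem.List.slice_natCast]

lemma strIsdigit_singleton (c : Char) :
    PySem.Chars.strIsdigit [c] = PySem.Chars.isdigit c := by
  simp [PySem.Chars.strIsdigit]

lemma isdigit_ne_dash (c : Char) (h : PySem.Chars.isdigit c = true) : c ≠ '-' := by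
  intro he; subst he; simp [PySem.Chars.isdigit] at h

lemma findB_spec_aux (n : Nat) :
    ∀ (l : List Char), l.length ≤ n →
      findB_loop ((splitDash l).drop 1) = specF l ∧
      findB_loop (splitDash l) = specF ('-' :: l) := by
  induction n with
  | zero =>
    intro l h
    have hl : l = [] := by cases l with | nil => rfl | cons a t => simp at h
    subst hl
    constructor
    · simp [splitDash, findB_loop, specF]
    · simp [splitDash, findB_loop, slice_take1, PySem.Chars.strIsdigit, specF]
  | succ n ih =>
    intro l hl
    cases l with
    | nil =>
      constructor
      · simp [splitDash, findB_loop, specF]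
      · simp [splitDash, findB_loop, slice_take1, PySem.Chars.strIsdigit, specF]
    | cons c rest =>
      have hrest : rest.length ≤ n := by simp at hl; omega
      constructor
      · -- P : findB_loop ((splitDash (c :: rest)).drop 1) = specF (c :: rest)
        by_cases hc : c = '-'
        · simp only [splitDash, if_pos hc, List.drop_succ_cons, List.drop_zero]
          rw [(ih rest hrest).2]
          simp [specF, hc]
        · simp only [splitDash, if_neg hc, List.drop_one, tail_modifyHead]
          rw [← List.drop_one, (ih rest hrest).1]
          simp [specF, hc]
      · -- Q : findB_loop (splitDash (c :: rest)) = specF ('-' :: c :: rest)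
        by_cases hcd : PySem.Chars.isdigit c
        · have hc : c ≠ '-' := isdigit_ne_dash c hcd
          obtain ⟨q, qs, hq⟩ : ∃ q qs, splitDash rest = q :: qs := by
            cases hsp : splitDash rest with
            | nil => exact absurd hsp (splitDash_ne_nil rest)
            | cons q qs => exact ⟨q, qs, rfl⟩
          simp only [splitDash, if_neg hc, hq, List.modifyHead_cons]
          cases rest with
          | nil =>
            simp [splitDash] at hq
            rw [findB_loop]
            simp [hq.1, slice_take1, slice_mid, hcd, PySem.Chars.strIsdigit, specF]
          | cons e tl2 =>
            by_cases hed : PySem.Chars.isdigit e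
            · have he : e ≠ '-' := isdigit_ne_dash e hed
              obtain ⟨q2, qs2, hq2⟩ : ∃ q2 qs2, splitDash tl2 = q2 :: qs2 := by
                cases hsp : splitDash tl2 with
                | nil => exact absurd hsp (splitDash_ne_nil tl2)
                | cons q2 qs2 => exact ⟨q2, qs2, rfl⟩
              have : q = e :: q2 := by
                simp only [splitDash, if_neg he, hq2, List.modifyHead_cons] at hq
                exact (List.cons.injEq _ _ _ _ ▸ hq).1.symm ▸ rfl
              subst this
              rw [findB_loop]
              simp [slice_take1, slice_take2, slice_mid, strIsdigit_singleton, hcd, hed, specF]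
            · have hval : q.take 1 = [] ∨ (∃ q2, q = e :: q2) := by
                by_cases he : e = '-'
                · left
                  simp only [splitDash, if_pos he] at hq
                  have : q = [] := (List.cons.injEq _ _ _ _ ▸ hq).1.symm ▸ rfl
                  simp [this]
                · right
                  obtain ⟨q2, qs2, hq2⟩ : ∃ q2 qs2, splitDash tl2 = q2 :: qs2 := by
                    cases hsp : splitDash tl2 with
                    | nil => exact absurd hsp (splitDash_ne_nil tl2)
                    | cons q2 qs2 => exact ⟨q2, qs2, rfl⟩
                  simp only [splitDash, if_neg he, hq2, List.modifyHead_cons] at hq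
                  exact ⟨q2, ((List.cons.injEq _ _ _ _ ▸ hq).1.symm ▸ rfl)⟩
              rw [findB_loop]
              rcases hval with hnil | ⟨q2, hq2⟩
              · simp [slice_take1, slice_mid, hcd, hed, hnil, PySem.Chars.strIsdigit, specF]
              · subst hq2
                simp [slice_take1, slice_mid, strIsdigit_singleton, hcd, hed, specF]
        · -- c not a digit: fall through on both sides
          by_cases hc : c = '-'
          · simp only [splitDash, if_pos hc]
            rw [findB_loop]
            rw [slice_take1]
            simp only [List.take_nil, PySem.Chars.strIsdigit]
            simp only [List.isEmpty_nil, Bool.not_true, Bool.false_and]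
            rw [(ih rest hrest).2]
            simp [specF, hc, (by decide : PySem.Chars.isdigit '-' = false)]
          · obtain ⟨q, qs, hq⟩ : ∃ q qs, splitDash rest = q :: qs := by
              cases hsp : splitDash rest with
              | nil => exact absurd hsp (splitDash_ne_nil rest)
              | cons q qs => exact ⟨q, qs, rfl⟩
            simp only [splitDash, if_neg hc, hq, List.modifyHead_cons]
            rw [findB_loop]
            rw [slice_take1]
            simp only [List.take_succ_cons, List.take_zero, strIsdigit_singleton, hcd]
            have : qs = (splitDash rest).drop 1 := by rw [hq]; simp
            rw [this, (ih rest hrest).1]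
            simp [specF, hc, hcd]

lemma findB_spec (l : List Char) :
    findB_loop ((splitDash l).drop 1) = specF l :=
  (findB_spec_aux l.length l le_rfl).1

-- ===== VERDICT (by name: the statement is the Claim_ definition above) =====
theorem find_placement_spec : Claim_equal_find_placement := by
  intro s _hdom
  unfold Spec_find_placement find_placement find_placement_alt
  rw [splitOn_eq_splitDash]
  by_cases h : PySem.Str.isIn "-next" s
  · rw [if_pos h, if_pos h]
  · rw [if_neg h, if_neg h, findA_loop_eq_specF, ← findB_spec]
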